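-- pv_equiv track=rewrite | github.com/Cyber-Terrain-Ontology/framework-cve | src/framework_cve/ontology/serializer.py | _emit_subject
-- ===== SOURCE A (Python) =====
-- Triple = tuple[str, str, str]
--
-- def _emit_subject(subject: str, triples: list[Triple]) -> str:
--     """Format a list of triples sharing the same subject as a Turtle block."""
--     if not triples:
--         return ""
--     lines = [f"{subject}"]
--     for i, (_, pred, obj) in enumerate(triples):
--         sep = " ;" if i < len(triples) - 1 else " ."
--         lines.append(f"    {pred} {obj}{sep}")
--     return "\n".join(lines) + "\n"
-- ===== SOURCE B (Python) =====
-- def _emit_subject(subject: str, triples: list[tuple[str, str, str]]) -> str: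
--     """Format a list of triples sharing the same subject as a Turtle block."""
--     if not triples:
--         return ""
--
--     def rec(ts):
--         (_, pred, obj), *rest = ts
--         line = f"    {pred} {obj}"
--         if not rest:
--             return line + " .\n"
--         return line + " ;\n" + rec(rest)
--
--     return subject + "\n" + rec(triples)
-- ===== Notes on version B (the rewrite author's own statement) =====
-- stated objective: alternative
-- what changed: Replaced A's indexed loop (enumerate with an i < len-1 comparison deciding each separator, accumulating lines joined at the end) by structural recursion on the list: each call emits its line with ' ;\n' and recurses, the last element is detected by an empty tail and terminated with ' .\n'; no index, length, list accumulator or join remains.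
import Mathlib
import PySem

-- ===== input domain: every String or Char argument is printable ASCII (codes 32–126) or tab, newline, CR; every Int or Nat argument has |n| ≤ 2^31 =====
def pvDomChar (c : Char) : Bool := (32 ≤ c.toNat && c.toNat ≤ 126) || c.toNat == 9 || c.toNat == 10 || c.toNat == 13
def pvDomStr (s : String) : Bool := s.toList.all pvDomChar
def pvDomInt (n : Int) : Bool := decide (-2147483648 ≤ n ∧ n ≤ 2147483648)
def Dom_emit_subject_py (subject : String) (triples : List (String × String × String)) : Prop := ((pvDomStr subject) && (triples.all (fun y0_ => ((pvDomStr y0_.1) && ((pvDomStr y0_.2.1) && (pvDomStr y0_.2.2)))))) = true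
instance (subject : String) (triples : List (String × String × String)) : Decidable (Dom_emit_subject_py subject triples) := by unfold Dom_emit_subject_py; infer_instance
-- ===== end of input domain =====

-- B replaces A's index-based loop (enumerate + i < len-1 separator choice + join) by structural
-- recursion that detects the last element by its empty tail (alternative decomposition, same cost).

-- ===== PORT A =====
-- lines = [subject]; for i,(…) in enumerate(triples): append line with sep decided by i < len-1; "\n".join + "\n"
def emit_subject_py (subject : String) (triples : List (String × String × String)) : String :=
  if triples = [] then "" else
  let lines := [subject] ++ (PySem.List.enumerate triples).map (fun p =>
    "    " ++ p.2.2.1 ++ " " ++ p.2.2.2 ++ (if p.1 < (triples.length : Int) - 1 then " ;" else " ."))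
  PySem.Str.join "\n" lines ++ "\n"

-- ===== PORT B =====
-- rec(ts): destructure head; empty tail → line + " .\n", else line + " ;\n" + rec(rest)
def pvEmitRec : List (String × String × String) → String
  | [] => ""          -- unreachable: rec is only called on non-empty lists
  | [t] => "    " ++ t.2.1 ++ " " ++ t.2.2 ++ " .\n"
  | t :: r :: rs => "    " ++ t.2.1 ++ " " ++ t.2.2 ++ " ;\n" ++ pvEmitRec (r :: rs)

def emit_subject_py_alt (subject : String) (triples : List (String × String × String)) : String :=
  if triples = [] then "" else subject ++ "\n" ++ pvEmitRec triples

-- ===== PRECONDITION & SPEC =====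
def Spec_emit_subject_py (subject : String) (triples : List (String × String × String)) (out : String) : Prop := out = emit_subject_py_alt subject triples
instance (subject : String) (triples : List (String × String × String)) (out : String) : Decidable (Spec_emit_subject_py subject triples out) := by unfold Spec_emit_subject_py; infer_instance

-- ===== CLAIM (what is proved, stated in full; the proofs are below) =====
def Claim_equal_emit_subject_py : Prop := ∀ (subject : String) (triples : List (String × String × String)), Dom_emit_subject_py subject triples → Spec_emit_subject_py subject triples (emit_subject_py subject triples)

-- ===== LEMMAS AND PROOFS =====

-- A's joined body lines (index-decided separators) + trailing "\n" equal B's recursion, at char level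
theorem pv_key (n : Int) (x : String × String × String)
    (ts : List (String × String × String)) : ∀ (s : Int), s + 1 + ts.length = n →
    PySem.Chars.join "\n".toList
      ((PySem.List.enumerate (x :: ts) s).map (fun p =>
        ("    " ++ p.2.2.1 ++ " " ++ p.2.2.2 ++ (if p.1 < n - 1 then " ;" else " .")).toList))
      ++ "\n".toList
    = (pvEmitRec (x :: ts)).toList := by
  induction ts generalizing x with
  | nil =>
      intro s hs
      simp only [List.length_nil] at hs
      have h : ¬ s < n - 1 := by omega
      simp [PySem.List.enumerate, PySem.Chars.join, h, List.intercalate, pvEmitRec]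
  | cons y ts ih =>
      intro s hs
      simp only [List.length_cons] at hs
      push_cast at hs
      have h : s < n - 1 := by omega
      have ih' := ih y (s + 1) (by omega)
      rw [PySem.List.enumerate_cons, PySem.List.enumerate_cons, List.map_cons,
        List.map_cons, PySem.Chars.join_cons_cons, pvEmitRec]
      simp only [PySem.List.enumerate_cons, List.map_cons] at ih'
      simp only [String.toList_append]
      rw [← ih']
      simp [h, List.append_assoc]

-- ===== VERDICT (by name: the statement is the Claim_ definition above) =====
theorem emit_subject_py_spec : Claim_equal_emit_subject_py := by
  unfold Claim_equal_emit_subject_py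
  intro subject triples _
  unfold Spec_emit_subject_py emit_subject_py emit_subject_py_alt
  cases triples with
  | nil => simp
  | cons x ts =>
      simp only [if_neg (List.cons_ne_nil x ts)]
      apply String.toList_inj.mp
      have key := pv_key ((x :: ts).length : Int) x ts 0 (by simp only [List.length_cons]; push_cast; omega)
      simp only [PySem.Str.join, String.toList_ofList, List.map_cons, List.map_map,
        Function.comp_def, apply_ite String.toList, String.toList_append,
        List.length_cons, List.singleton_append] at key ⊢
      push_cast at key ⊢
      rw [PySem.List.enumerate_cons, List.map_cons] at key ⊢
      rw [PySem.Chars.join_cons_cons, ← key]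
      simp [List.append_assoc]
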